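-- pv_equiv track=rewrite | github.com/dukehootfish/Handy-Mouse | features/zoom.py | _infer_secondary_label
-- ===== SOURCE A (Python) =====
-- def _infer_secondary_label(frame_labels, main_label, explicit_secondary):
--     if explicit_secondary:
--         return explicit_secondary
--     if not frame_labels:
--         return None
--     if main_label:
--         for label in frame_labels:
--             if label and label != main_label:
--                 return label
--     # Fallback: just grab the first available labeled hand
--     for label in frame_labels:
--         if label:
--             return label
--     return None
-- ===== SOURCE B (Python) =====
-- def _infer_secondary_label(frame_labels, main_label, explicit_secondary):
--     if explicit_secondary:
--         return explicit_secondary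
--     if not frame_labels:
--         return None
--     fallback = None
--     for label in frame_labels:
--         if label:
--             if main_label and label != main_label:
--                 return label
--             if fallback is None:
--                 fallback = label
--     return fallback
-- ===== Notes on version B (the rewrite author's own statement) =====
-- stated objective: simpler
-- what changed: Replaces A's two separate scans (first differing label, then first truthy label) with a single pass that early-returns a differing label and maintains a first-truthy fallback.
import Mathlib
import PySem

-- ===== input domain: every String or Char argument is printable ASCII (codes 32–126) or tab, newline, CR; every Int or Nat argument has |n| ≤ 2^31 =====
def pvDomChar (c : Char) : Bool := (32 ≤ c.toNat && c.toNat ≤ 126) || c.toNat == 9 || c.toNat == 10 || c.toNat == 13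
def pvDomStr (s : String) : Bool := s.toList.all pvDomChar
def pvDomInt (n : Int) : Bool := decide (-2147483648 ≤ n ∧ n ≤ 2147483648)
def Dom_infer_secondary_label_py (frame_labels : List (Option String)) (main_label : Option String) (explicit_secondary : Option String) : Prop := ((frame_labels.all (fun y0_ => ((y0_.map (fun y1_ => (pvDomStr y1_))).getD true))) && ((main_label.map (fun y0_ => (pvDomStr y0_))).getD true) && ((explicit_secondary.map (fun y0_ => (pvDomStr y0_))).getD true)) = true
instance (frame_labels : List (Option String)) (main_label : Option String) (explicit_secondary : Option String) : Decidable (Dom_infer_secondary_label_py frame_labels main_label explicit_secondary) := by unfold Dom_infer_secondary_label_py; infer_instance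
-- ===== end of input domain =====

-- B merges A's two scans into a single pass with a fallback accumulator (objective: simpler); same return value on all inputs.


-- ===== PORT A =====
-- truthiness of an Option String label (Python: None and "" are falsy)
def pvTruthy (o : Option String) : Bool :=
  match o with
  | none => false
  | some s => s != ""

-- first truthy label differing from main_label (A's first loop)
def pvAux1 : List (Option String) → Option String → Option String
  | [], _ => none
  | l :: ls, m => if pvTruthy l && l != m then l else pvAux1 ls m

-- first truthy label (A's fallback loop)
def pvAux2 : List (Option String) → Option String
  | [] => none
  | l :: ls => if pvTruthy l then l else pvAux2 ls

def infer_secondary_label_py (frame_labels : List (Option String)) (main_label : Option String) (explicit_secondary : Option String) : Option String :=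
  if pvTruthy explicit_secondary then explicit_secondary
  else if frame_labels = [] then none
  else if pvTruthy main_label then
    match pvAux1 frame_labels main_label with
    | some s => some s
    | none => pvAux2 frame_labels
  else pvAux2 frame_labels

-- ===== PORT B =====
-- single pass: early-return a truthy label differing from main, keep first truthy as fallback
def pvLoop (main_label : Option String) : List (Option String) → Option String → Option String
  | [], fb => fb
  | l :: ls, fb =>
    if pvTruthy l then
      if pvTruthy main_label && l != main_label then l
      else pvLoop main_label ls (if fb = none then l else fb)
    else pvLoop main_label ls fb

def infer_secondary_label_py_alt (frame_labels : List (Option String)) (main_label : Option String) (explicit_secondary : Option String) : Option String :=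
  if pvTruthy explicit_secondary then explicit_secondary
  else if frame_labels = [] then none
  else pvLoop main_label frame_labels none

-- ===== PRECONDITION & SPEC =====
def Spec_infer_secondary_label_py (frame_labels : List (Option String)) (main_label : Option String) (explicit_secondary : Option String) (out : Option String) : Prop := out = infer_secondary_label_py_alt frame_labels main_label explicit_secondary
instance (frame_labels : List (Option String)) (main_label : Option String) (explicit_secondary : Option String) (out : Option String) : Decidable (Spec_infer_secondary_label_py frame_labels main_label explicit_secondary out) := by unfold Spec_infer_secondary_label_py; infer_instance

-- ===== CLAIM (what is proved, stated in full; the proofs are below) =====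
def Claim_equal_infer_secondary_label_py : Prop := ∀ (frame_labels : List (Option String)) (main_label : Option String) (explicit_secondary : Option String), Dom_infer_secondary_label_py frame_labels main_label explicit_secondary → Spec_infer_secondary_label_py frame_labels main_label explicit_secondary (infer_secondary_label_py frame_labels main_label explicit_secondary)

-- ===== LEMMAS AND PROOFS =====
-- when main_label is falsy, B's loop returns the fallback if set, else the first truthy label
theorem pvLoop_falsy (m : Option String) (hm : pvTruthy m = false) :
    ∀ (fl : List (Option String)) (fb : Option String),
      pvLoop m fl fb = match fb with | some s => some s | none => pvAux2 fl := by
  intro fl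
  induction fl with
  | nil => intro fb; cases fb <;> simp [pvLoop, pvAux2]
  | cons l ls ih =>
    intro fb
    by_cases hl : pvTruthy l = true
    · cases fb with
      | none =>
        cases l with
        | none => simp [pvTruthy] at hl
        | some s =>
          simp [pvLoop, hl, hm, ih, pvAux2]
      | some x => simp [pvLoop, hl, hm, ih]
    · simp at hl
      simp [pvLoop, hl, ih, pvAux2]

-- when main_label is truthy, B's loop returns the first differing truthy label if any,
-- else the fallback if set, else the first truthy label
theorem pvLoop_truthy (m : Option String) (hm : pvTruthy m = true) :
    ∀ (fl : List (Option String)) (fb : Option String),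
      pvLoop m fl fb =
        match pvAux1 fl m with
        | some s => some s
        | none => match fb with | some s => some s | none => pvAux2 fl := by
  intro fl
  induction fl with
  | nil => intro fb; cases fb <;> simp [pvLoop, pvAux1, pvAux2]
  | cons l ls ih =>
    intro fb
    by_cases hl : pvTruthy l = true
    · by_cases hd : (l != m) = true
      · cases l with
        | none => simp [pvTruthy] at hl
        | some s => simp [pvLoop, pvAux1, hl, hm, hd]
      · simp at hd
        cases h1 : pvAux1 ls m with
        | some t =>
          cases fb <;>
            simp [pvLoop, pvAux1, hm, hd, ih, h1]
        | none =>
          cases fb with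
          | none =>
            cases l with
            | none => simp [pvTruthy] at hl
            | some s =>
              cases m with
              | none => simp [pvTruthy] at hm
              | some t => simp [pvLoop, pvAux1, pvAux2, hm, hd, ih, h1]
          | some x => simp [pvLoop, pvAux1, hm, hd, ih, h1]
    · simp at hl
      simp [pvLoop, pvAux1, pvAux2, hl, ih]

-- ===== VERDICT (by name: the statement is the Claim_ definition above) =====
theorem infer_secondary_label_py_spec : Claim_equal_infer_secondary_label_py := by
  intro fl ml ex _
  unfold Spec_infer_secondary_label_py infer_secondary_label_py infer_secondary_label_py_alt
  by_cases hex : pvTruthy ex = true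
  · simp [hex]
  · simp at hex
    by_cases hfl : fl = []
    · simp [hex, hfl]
    · by_cases hm : pvTruthy ml = true
      · simp [hex, hfl, hm, pvLoop_truthy ml hm fl none]
      · simp at hm
        simp [hex, hfl, hm, pvLoop_falsy ml hm fl none]
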